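-- pv_equiv track=rewrite | github.com/SuccessPear/UPS-Programming | 24.10/sorted_sum.py | sortedSum
-- ===== SOURCE A (Python) =====
-- from bisect import bisect
--
-- def sortedSum(a):
--     # Write your code here
--     sorted_list = [a[0]]
--     f = a[0]
--     result = f
--     for i in range(1, len(a)):
--         idx = bisect(sorted_list, a[i])
--         tmp = 0
--         for j in range(idx, len(sorted_list)):
--             tmp += sorted_list[j]
--         f += a[i]*(idx+1) + tmp
--         result = (result + f) % (10**9 + 7)
--         sorted_list.insert(idx, a[i])
--
--     return result
-- ===== SOURCE B (Python) =====
-- def sortedSum(a):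
--     # Recompute each prefix's weighted sum from scratch: sort the prefix and
--     # sum (rank+1)*value; no incremental f, no bisect/insert bookkeeping.
--     M = 10**9 + 7
--     prefix = [a[0]]
--     result = a[0]
--     for x in a[1:]:
--         prefix.append(x)
--         f = 0
--         for k, v in enumerate(sorted(prefix)):
--             f += (k + 1) * v
--         result = (result + f) % M
--     return result
-- ===== Notes on version B (the rewrite author's own statement) =====
-- stated objective: alternative
-- what changed: B drops A's incrementally maintained sorted list and running weighted sum (bisect + insert + suffix-sum inner loop) and instead recomputes each prefix's value from scratch: it sorts the whole prefix and sums (rank+1)*value; it trades A's incremental bookkeeping for per-step library sorting.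
-- outside the precondition, e.g. on sortedSum([]): A raises IndexError, B raises IndexError
import Mathlib
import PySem

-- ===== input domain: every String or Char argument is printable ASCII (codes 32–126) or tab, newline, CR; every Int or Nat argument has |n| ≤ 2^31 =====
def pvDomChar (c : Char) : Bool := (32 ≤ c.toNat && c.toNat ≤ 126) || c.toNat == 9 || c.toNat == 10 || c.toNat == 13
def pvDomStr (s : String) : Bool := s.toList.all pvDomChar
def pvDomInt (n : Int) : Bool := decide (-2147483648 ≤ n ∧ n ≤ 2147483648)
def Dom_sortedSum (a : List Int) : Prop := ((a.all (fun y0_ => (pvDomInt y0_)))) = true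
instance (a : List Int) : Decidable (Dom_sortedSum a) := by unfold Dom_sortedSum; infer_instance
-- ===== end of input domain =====

-- B replaces A's incremental sorted-list bookkeeping (bisect + insert + suffix-sum inner
-- loop + running f) by recomputing each prefix's weighted sum from scratch: sort the
-- prefix, sum (rank+1)*value; objective: alternative (no incremental state).

-- ===== PORT A =====
-- one iteration of A's loop body: state = (sorted_list, f, result)
def pvStepA (st : List Int × Int × Int) (ai : Int) : List Int × Int × Int :=
  let sl := st.1
  let f := st.2.1
  let res := st.2.2
  let idx := PySem.List.bisectRight sl ai          -- bisect.bisect(sorted_list, a[i])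
  -- 'for j in range(idx, len(sorted_list)): tmp += sorted_list[j]' = fold over the suffix
  let tmp := (sl.drop idx).foldl (fun acc y => acc + y) 0
  let f' := f + ai * ((idx : Int) + 1) + tmp
  let res' := PySem.Int.mod (res + f') (10 ^ 9 + 7)
  (PySem.List.insert sl (idx : Int) ai, f', res')

def sortedSum (a : List Int) : Int :=
  match a with
  | [] => 0                                         -- a[0] raises IndexError; excluded by Pre_
  | x :: rest => (rest.foldl pvStepA ([x], x, x)).2.2

-- ===== PORT B =====
-- one iteration of B's loop: state = (prefix, result); f recomputed from sorted prefix
def pvStepB (st : List Int × Int) (x : Int) : List Int × Int :=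
  let pre := st.1 ++ [x]                            -- prefix.append(x)
  -- 'for k, v in enumerate(sorted(prefix)): f += (k+1)*v'
  let f := (PySem.List.enumerate (PySem.List.sorted pre (fun v => v) false) 0).foldl
             (fun acc kv => acc + (kv.1 + 1) * kv.2) 0
  (pre, PySem.Int.mod (st.2 + f) (10 ^ 9 + 7))

def sortedSum_alt (a : List Int) : Int :=
  match a with
  | [] => 0                                         -- a[0] raises IndexError; excluded by Pre_
  | x :: rest => (rest.foldl pvStepB ([x], x)).2

-- ===== PRECONDITION & SPEC =====
-- Both A and B raise IndexError on the empty list (a[0]); only that input is excluded.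
def Pre_sortedSum (a : List Int) : Prop := a ≠ []
instance (a : List Int) : Decidable (Pre_sortedSum a) := by unfold Pre_sortedSum; infer_instance
def pvWitness_sortedSum : List Int := [3, 1, 2]

def Spec_sortedSum (a : List Int) (out : Int) : Prop := out = sortedSum_alt a
instance (a : List Int) (out : Int) : Decidable (Spec_sortedSum a out) := by unfold Spec_sortedSum; infer_instance

-- ===== CLAIM (what is proved, stated in full; the proofs are below) =====
def Claim_equal_sortedSum : Prop := ∀ (a : List Int), Dom_sortedSum a → Pre_sortedSum a → Spec_sortedSum a (sortedSum a)

-- ===== LEMMAS AND PROOFS =====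

-- weighted sum with starting rank s: wsum s [v0, v1, …] = (s+1)*v0 + (s+2)*v1 + …
def pvWsum (s : Int) : List Int → Int
  | [] => 0
  | h :: t => (s + 1) * h + pvWsum (s + 1) t

lemma pvEnumFold (l : List Int) : ∀ (s acc : Int),
    (PySem.List.enumerate l s).foldl (fun acc kv => acc + (kv.1 + 1) * kv.2) acc
      = acc + pvWsum s l := by
  induction l with
  | nil => intro s acc; simp [pvWsum, PySem.List.enumerate_nil]
  | cons h t ih =>
      intro s acc
      rw [PySem.List.enumerate_cons, List.foldl_cons, ih]
      simp [pvWsum]; ring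

lemma pvWsum_append (t l : List Int) : ∀ (s : Int),
    pvWsum s (t ++ l) = pvWsum s t + pvWsum (s + t.length) l := by
  induction t with
  | nil => intro s; simp [pvWsum]
  | cons h tl ih =>
      intro s
      simp only [List.cons_append, pvWsum, ih (s + 1), List.length_cons]
      have h1 : s + 1 + (tl.length : Int) = s + ((tl.length : Int) + 1) := by ring
      rw [h1]
      push_cast
      ring

lemma pvWsum_shift (l : List Int) : ∀ (s : Int), pvWsum (s + 1) l = pvWsum s l + l.sum := by
  induction l with
  | nil => intro s; simp [pvWsum]
  | cons h t ih =>
      intro s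
      simp only [pvWsum, List.sum_cons, ih (s + 1)]
      ring

-- inserting x at position |t| shifts the suffix ranks by one
lemma pvWsum_insert (t d : List Int) (x : Int) :
    pvWsum 0 (t ++ x :: d) = pvWsum 0 (t ++ d) + x * ((t.length : Int) + 1) + d.sum := by
  rw [pvWsum_append t (x :: d) 0, pvWsum_append t d 0]
  simp only [pvWsum, zero_add]
  rw [pvWsum_shift d (t.length : Int)]
  ring

-- the bisect index splits a sorted list into the elements ≤ x and the elements > x
lemma pvBisect_facts (sl : List Int) (x : Int) (hs : sl.Pairwise (· ≤ ·)) :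
    PySem.List.bisectRight sl x ≤ sl.length ∧
    (∀ y ∈ sl.take (PySem.List.bisectRight sl x), y ≤ x) ∧
    (∀ y ∈ sl.drop (PySem.List.bisectRight sl x), x < y) := by
  obtain ⟨hle, hpre, hsuf⟩ := PySem.List.bisectRight_spec sl x hs
  refine ⟨hle, ?_, ?_⟩
  · intro y hy
    obtain ⟨j, hj, hget⟩ := List.mem_iff_getElem.mp hy
    have hjlt : j < PySem.List.bisectRight sl x := by
      have := hj; simp [List.length_take] at this; omega
    have hjl : j < sl.length := lt_of_lt_of_le hjlt hle
    have : sl[j] = y := by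
      rw [← hget]; exact (List.getElem_take ..).symm
    exact this ▸ hpre j hjl hjlt
  · intro y hy
    obtain ⟨j, hj, hget⟩ := List.mem_iff_getElem.mp hy
    have hjl : PySem.List.bisectRight sl x + j < sl.length := by
      have := hj; simp [List.length_drop] at this; omega
    have : sl[PySem.List.bisectRight sl x + j] = y := by
      rw [← hget]; exact (List.getElem_drop ..).symm
    exact this ▸ hsuf _ hjl (Nat.le_add_right _ _)

-- inserting at the bisect index keeps the list sorted and is a permutation of consing
lemma pvInsert_eq (sl : List Int) (x : Int) (hs : sl.Pairwise (· ≤ ·)) :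
    PySem.List.insert sl ((PySem.List.bisectRight sl x : Nat) : Int) x
      = sl.take (PySem.List.bisectRight sl x) ++ x :: sl.drop (PySem.List.bisectRight sl x) :=
  PySem.List.insert_natCast sl _ x (pvBisect_facts sl x hs).1

lemma pvInsert_perm (sl : List Int) (x : Int) (hs : sl.Pairwise (· ≤ ·)) :
    (PySem.List.insert sl ((PySem.List.bisectRight sl x : Nat) : Int) x).Perm (x :: sl) := by
  rw [pvInsert_eq sl x hs]
  have h := List.perm_middle (a := x) (l₁ := sl.take (PySem.List.bisectRight sl x))
    (l₂ := sl.drop (PySem.List.bisectRight sl x))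
  rw [List.take_append_drop] at h
  exact h

lemma pvInsert_sorted (sl : List Int) (x : Int) (hs : sl.Pairwise (· ≤ ·)) :
    (PySem.List.insert sl ((PySem.List.bisectRight sl x : Nat) : Int) x).Pairwise (· ≤ ·) := by
  obtain ⟨hle, hpre, hsuf⟩ := pvBisect_facts sl x hs
  rw [pvInsert_eq sl x hs]
  have hsplit := hs
  conv at hsplit => rw [← List.take_append_drop (PySem.List.bisectRight sl x) sl]
  rw [List.pairwise_append] at hsplit
  obtain ⟨hst, hsd, hcross⟩ := hsplit
  rw [List.pairwise_append]
  refine ⟨hst, ?_, ?_⟩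
  · rw [List.pairwise_cons]
    exact ⟨fun y hy => le_of_lt (hsuf y hy), hsd⟩
  · intro y hy z hz
    rcases List.mem_cons.mp hz with rfl | hz
    · exact hpre y hy
    · exact hcross y hy z hz

lemma pvFoldlSum (l : List Int) : l.foldl (fun acc y => acc + y) 0 = l.sum := by
  rw [PySem.List.foldl_add (g := fun y => y)]; simp

-- the two loop bodies preserve the coupling: A's sorted list ~ B's raw prefix,
-- A's running f = weighted sum of its sorted list, same result
lemma pvLoop_eq (rest : List Int) : ∀ (sl pre : List Int) (res : Int),
    sl.Pairwise (· ≤ ·) → sl.Perm pre →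
    ((rest.foldl pvStepA (sl, pvWsum 0 sl, res)).2.2 = (rest.foldl pvStepB (pre, res)).2) := by
  induction rest with
  | nil => intro sl pre res _ _; rfl
  | cons x t ih =>
      intro sl pre res hs hperm
      simp only [List.foldl_cons]
      set idx := PySem.List.bisectRight sl x with hidx
      have hins := pvInsert_eq sl x hs
      have hlen : ((sl.take idx).length : Int) = (idx : Int) := by
        have := (pvBisect_facts sl x hs).1
        simp [List.length_take]; omega
      -- A's new f equals the weighted sum of the new sorted list
      have hf' : pvWsum 0 (PySem.List.insert sl ((idx : Nat) : Int) x)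
          = pvWsum 0 sl + x * ((idx : Int) + 1) + (sl.drop idx).sum := by
        rw [hins, pvWsum_insert, hlen]
        rw [← List.take_append_drop idx sl]
        simp [hidx]
      -- B sorts the new prefix; that sorted list IS A's inserted list
      have hsortedEq : PySem.List.sorted (pre ++ [x]) (fun v => v) false
          = PySem.List.insert sl ((idx : Nat) : Int) x := by
        apply PySem.List.sorted_id_eq_of_perm_of_pairwise
        · exact (pvInsert_perm sl x hs).trans
            ((hperm.cons x).trans (List.perm_append_singleton x pre).symm)
        · exact pvInsert_sorted sl x hs
      have hA : pvStepA (sl, pvWsum 0 sl, res) x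
          = (PySem.List.insert sl ((idx : Nat) : Int) x,
             pvWsum 0 (PySem.List.insert sl ((idx : Nat) : Int) x),
             PySem.Int.mod (res + pvWsum 0 (PySem.List.insert sl ((idx : Nat) : Int) x))
               (10 ^ 9 + 7)) := by
        simp only [pvStepA, pvFoldlSum, hf', ← hidx]
      have hB : pvStepB (pre, res) x
          = (pre ++ [x],
             PySem.Int.mod (res + pvWsum 0 (PySem.List.insert sl ((idx : Nat) : Int) x))
               (10 ^ 9 + 7)) := by
        simp only [pvStepB, hsortedEq, pvEnumFold, zero_add]
      rw [hA, hB]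
      exact ih _ _ _ (pvInsert_sorted sl x hs)
        (((pvInsert_perm sl x hs).trans (hperm.cons x)).trans
          (List.perm_append_singleton x pre).symm)

-- ===== VERDICT (by name: the statement is the Claim_ definition above) =====
theorem sortedSum_spec : Claim_equal_sortedSum := by
  intro a _ hpre
  unfold Spec_sortedSum
  match a with
  | [] => exact absurd rfl hpre
  | x :: rest =>
      simp only [sortedSum, sortedSum_alt]
      have hx : pvWsum 0 [x] = x := by simp [pvWsum]
      have h := pvLoop_eq rest [x] [x] x (by simp) (List.Perm.refl _)
      rw [hx] at h
      exact h
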